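-- pv_equiv track=rewrite | github.com/DMOJ/online-judge | judge/ratings_cf.py | recalculate_ranks
-- ===== SOURCE A (Python) =====
-- def recalculate_ranks(initial_ranks):
--     # if users M through N tie at ranking K, then they all get assigned rank
--     # K + (N-M)
--     old_ranking_to_new_ranking = {}
--     sorted_ranks = sorted(initial_ranks)
--     i = 0
--     while i < len(sorted_ranks):
--         first = i
--         last = first
--         rank = sorted_ranks[first]
--         while last < len(sorted_ranks) and sorted_ranks[last] == rank:
--             last += 1
--         old_ranking_to_new_ranking[rank] = last
--         i = last
--     return [
--         old_ranking_to_new_ranking[old_rank]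
--         for old_rank in old_ranking_to_new_ranking
--     ]
-- ===== SOURCE B (Python) =====
-- def recalculate_ranks(initial_ranks):
--     # Count each rank once, then one prefix-sum pass over the distinct ranks
--     # in ascending order: the running total after rank r is the number of
--     # entries <= r, which is exactly the new rank A assigns.
--     counts = {}
--     for r in initial_ranks:
--         counts[r] = counts.get(r, 0) + 1
--     total = 0
--     result = []
--     for r in sorted(counts):
--         total += counts[r]
--         result.append(total)
--     return result
-- ===== Notes on version B (the rewrite author's own statement) =====
-- stated objective: simpler
-- what changed: Replaces A's index-jumping while-loop with a nested tie-scanning while-loop over the sorted list by a frequency dict built in one pass plus a running prefix sum over the sorted distinct ranks.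
import Mathlib
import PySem

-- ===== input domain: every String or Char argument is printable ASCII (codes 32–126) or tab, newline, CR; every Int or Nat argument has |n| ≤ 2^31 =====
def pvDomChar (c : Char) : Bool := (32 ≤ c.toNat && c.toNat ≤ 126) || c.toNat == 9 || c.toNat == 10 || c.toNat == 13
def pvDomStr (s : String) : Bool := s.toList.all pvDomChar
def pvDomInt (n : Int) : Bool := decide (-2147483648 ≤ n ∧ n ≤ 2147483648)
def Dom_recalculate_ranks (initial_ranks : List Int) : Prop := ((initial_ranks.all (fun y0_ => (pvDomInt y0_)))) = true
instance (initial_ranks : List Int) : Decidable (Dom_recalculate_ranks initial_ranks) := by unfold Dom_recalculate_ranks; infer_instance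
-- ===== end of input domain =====

-- B replaces A's sort-and-group while-loops by a frequency dict plus a prefix sum
-- over the sorted distinct ranks (simpler decomposition, same asymptotic cost).


-- ===== PORT A =====
-- inner while-loop: `while last < len(sorted_ranks) and sorted_ranks[last] == rank: last += 1`
def pyA_inner (s : List Int) (rank : Int) (last : Nat) : Nat :=
  if h : last < s.length then
    if s[last] = rank then pyA_inner s rank (last + 1) else last
  else last
termination_by s.length - last

theorem pyA_inner_ge (s : List Int) (rank : Int) (last : Nat) : last ≤ pyA_inner s rank last := by
  fun_induction pyA_inner with
  | case1 h heq ih => omega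
  | case2 h heq => exact le_refl _
  | case3 h => exact le_refl _

theorem pyA_inner_gt (s : List Int) (last : Nat) (h : last < s.length) :
    last < pyA_inner s (s[last]) last := by
  have h2 := pyA_inner_ge s (s[last]) (last + 1)
  unfold pyA_inner
  simp only [h, dif_pos, if_pos]
  omega

-- outer while-loop over `i`, building the dict
def pyA_loop (s : List Int) (i : Nat) (d : PySem.Dict Int Int) : PySem.Dict Int Int :=
  if h : i < s.length then
    let rank := s[i]
    let last := pyA_inner s rank i
    pyA_loop s last (d.insert rank (last : Int))
  else d
termination_by s.length - i
decreasing_by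
  have := pyA_inner_gt s i h
  omega

def recalculate_ranks (initial_ranks : List Int) : List Int :=
  let sorted_ranks := PySem.List.sorted initial_ranks (fun x => x) false
  let d := pyA_loop sorted_ranks 0 PySem.Dict.empty
  d.keys.map (fun old_rank => d.getD old_rank 0)

-- ===== PORT B =====
def recalculate_ranks_alt (initial_ranks : List Int) : List Int :=
  let counts := initial_ranks.foldl (fun d r => d.insert r (d.getD r 0 + 1)) PySem.Dict.empty
  let res := (PySem.List.sorted counts.keys (fun x => x) false).foldl
    (fun (acc : Int × List Int) r =>
      let total := acc.1 + counts.getD r 0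
      (total, acc.2 ++ [total])) ((0 : Int), ([] : List Int))
  res.2

-- ===== PRECONDITION & SPEC =====
def Spec_recalculate_ranks (initial_ranks : List Int) (out : List Int) : Prop := out = recalculate_ranks_alt initial_ranks
instance (initial_ranks : List Int) (out : List Int) : Decidable (Spec_recalculate_ranks initial_ranks out) := by unfold Spec_recalculate_ranks; infer_instance

-- ===== CLAIM (what is proved, stated in full; the proofs are below) =====
def Claim_equal_recalculate_ranks : Prop := ∀ (initial_ranks : List Int), Dom_recalculate_ranks initial_ranks → Spec_recalculate_ranks initial_ranks (recalculate_ranks initial_ranks)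

-- ===== LEMMAS AND PROOFS =====

-- A returns [d[k] for k in d] over its final dict d
def pvOut (d : PySem.Dict Int Int) : List Int := d.keys.map (fun k => d.getD k 0)

-- A's inner while-loop on a sorted list stops at the count of elements ≤ rank.
theorem pyA_inner_spec (s : List Int) (r : Int) (i : Nat) (hs : s.Pairwise (· ≤ ·))
    (hi : i ≤ s.length) (h1 : ∀ x ∈ s.take i, x ≤ r) (h2 : ∀ x ∈ s.drop i, r ≤ x) :
    pyA_inner s r i = s.countP (fun x => decide (x ≤ r)) ∧
    (∀ x ∈ s.take (pyA_inner s r i), x ≤ r) ∧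
    (∀ x ∈ s.drop (pyA_inner s r i), r < x) := by
  fun_induction pyA_inner with
  | case1 i h heq ih =>
    have htk : s.take (i+1) = s.take i ++ [s[i]] := by
      rw [List.take_add_one]; simp [List.getElem?_eq_getElem h]
    have hdk : s.drop i = s[i] :: s.drop (i+1) := List.drop_eq_getElem_cons h
    have h1' : ∀ x ∈ s.take (i+1), x ≤ r := by
      intro x hx
      rw [htk] at hx
      rcases List.mem_append.mp hx with hx | hx
      · exact h1 x hx
      · simp at hx; subst hx; exact le_of_eq heq
    have h2' : ∀ x ∈ s.drop (i+1), r ≤ x := by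
      intro x hx
      apply h2 x
      rw [hdk]; exact List.mem_cons_of_mem _ hx
    exact ih h h1' h2'
  | case2 i h heq =>
    have hdk : s.drop i = s[i] :: s.drop (i+1) := List.drop_eq_getElem_cons h
    have hlt : r < s[i] := by
      have := h2 s[i] (by rw [hdk]; exact List.mem_cons_self)
      omega
    have hgt : ∀ x ∈ s.drop i, r < x := by
      intro x hx
      rw [hdk] at hx
      rcases List.mem_cons.mp hx with hx | hx
      · omega
      · have hp : (s.drop i).Pairwise (· ≤ ·) := hs.drop
        rw [hdk] at hp
        have := (List.pairwise_cons.mp hp).1 x hx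
        omega
    constructor
    · rw [← List.take_append_drop i s, List.countP_append]
      have e1 : (s.take i).countP (fun x => decide (x ≤ r)) = i := by
        rw [List.countP_eq_length.mpr (by intro x hx; simpa using h1 x hx)]
        simp [List.length_take]; omega
      have e2 : (s.drop i).countP (fun x => decide (x ≤ r)) = 0 := by
        apply List.countP_eq_zero.mpr
        intro x hx
        have := hgt x hx
        simp; omega
      omega
    · exact ⟨h1, hgt⟩
  | case3 i h =>
    have hil : i = s.length := by omega
    subst hil
    constructor
    · rw [List.countP_eq_length.mpr]
      intro x hx
      have := h1 x (by rwa [List.take_length])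
      simp; omega
    · refine ⟨h1, ?_⟩
      intro x hx
      rw [List.drop_eq_nil_of_le (le_refl _)] at hx
      simp at hx

-- A's outer loop: its dict's lookups-in-key-order are the prefix counts over
-- some strictly increasing list u holding exactly the values of the unprocessed suffix.
theorem pyA_loop_spec (s : List Int) (hs : s.Pairwise (· ≤ ·)) (i : Nat) (d : PySem.Dict Int Int)
    (hi : i ≤ s.length)
    (hbd : ∀ x ∈ s.take i, ∀ y ∈ s.drop i, x < y)
    (hkeys : ∀ k ∈ d.keys, ∀ y ∈ s.drop i, k < y) :
    ∃ u : List Int, u.Pairwise (· < ·) ∧ (∀ x, x ∈ u ↔ x ∈ s.drop i) ∧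
      pvOut (pyA_loop s i d) =
        pvOut d ++ u.map (fun k => ((s.countP (fun x => decide (x ≤ k)) : Nat) : Int)) := by
  fun_induction pyA_loop with
  | case1 i d h rank last ih =>
    have hdk : s.drop i = s[i] :: s.drop (i+1) := List.drop_eq_getElem_cons h
    have hrmem : rank ∈ s.drop i := by rw [hdk]; exact List.mem_cons_self
    have h2 : ∀ x ∈ s.drop i, rank ≤ x := by
      intro x hx
      rw [hdk] at hx
      rcases List.mem_cons.mp hx with hx | hx
      · omega
      · have hp : (s.drop i).Pairwise (· ≤ ·) := hs.drop
        rw [hdk] at hp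
        exact (List.pairwise_cons.mp hp).1 x hx
    have h1 : ∀ x ∈ s.take i, x ≤ rank := fun x hx => le_of_lt (hbd x hx rank hrmem)
    obtain ⟨hcnt, htk, hdr⟩ := pyA_inner_spec s rank i hs (le_of_lt h) h1 h2
    have hlast_le : last ≤ s.length := by
      have := List.countP_le_length (l := s) (p := fun x => decide (x ≤ rank))
      omega
    have hlast_gt : i < last := pyA_inner_gt s i h
    have hsub : ∀ y ∈ s.drop last, y ∈ s.drop i := by
      intro y hy
      have e : (s.drop i).drop (last - i) = s.drop last := by
        rw [List.drop_drop]; congr 1; omega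
      rw [← e] at hy
      exact List.mem_of_mem_drop hy
    have hrk_not : rank ∉ d.keys := by
      intro hmem
      exact lt_irrefl rank (hkeys rank hmem rank hrmem)
    have hcont : d.contains rank = false := by
      rcases hc : d.contains rank with _ | _
      · rfl
      · exact absurd ((PySem.Dict.contains_iff_mem_keys _ _).mp hc) hrk_not
    obtain ⟨u', hp', hm', he'⟩ := ih hlast_le
      (by intro x hx y hy
          have hx' := htk x hx
          have hy' := hdr y hy
          omega)
      (by intro k hk y hy
          rcases (PySem.Dict.mem_keys_insert _ _ _ _).mp hk with hk | hk
          · subst hk; exact hdr y hy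
          · exact hkeys k hk y (hsub y hy))
    refine ⟨rank :: u', ?_, ?_, ?_⟩
    · refine List.pairwise_cons.mpr ⟨?_, hp'⟩
      intro y hy
      exact hdr y ((hm' y).mp hy)
    · intro x
      constructor
      · intro hx
        rcases List.mem_cons.mp hx with hx | hx
        · subst hx; exact hrmem
        · exact hsub x ((hm' x).mp hx)
      · intro hx
        have hge := h2 x hx
        have e : s.drop i = (s.take last).drop i ++ s.drop last := by
          conv_lhs => rw [← List.take_append_drop last s]
          rw [List.drop_append_of_le_length (by simp [List.length_take]; omega)]
        rw [e] at hx
        rcases List.mem_append.mp hx with hx | hx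
        · have hle := htk x (List.mem_of_mem_drop hx)
          have : x = rank := by omega
          exact this ▸ List.mem_cons_self
        · exact List.mem_cons_of_mem _ ((hm' x).mpr hx)
    · have hout : pvOut (d.insert rank (last : Int)) = pvOut d ++ [(last : Int)] := by
        unfold pvOut
        rw [PySem.Dict.keys_insert_of_not_contains (h := hcont), List.map_append]
        congr 1
        · apply List.map_congr_left
          intro k hk
          have hne : k ≠ rank := fun e => hrk_not (e ▸ hk)
          exact PySem.Dict.getD_insert_of_ne _ _ _ hne
        · simp [PySem.Dict.getD_insert_self]
      have hlI : ((last : Nat) : Int) = ((s.countP (fun x => decide (x ≤ rank)) : Nat) : Int) := by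
        rw [show last = pyA_inner s rank i from rfl, hcnt]
      rw [he', hout, List.map_cons, List.append_assoc, hlI]
      simp
  | case2 i d h =>
    have hil : i = s.length := by omega
    subst hil
    refine ⟨[], List.Pairwise.nil, ?_, by simp⟩
    intro x
    rw [List.drop_eq_nil_of_le (le_refl _)]

-- counting elements not in u', after removing its lower bound k from u = k :: u'
theorem countP_notmem_cons (l : List Int) (k : Int) (u' : List Int) (hk : k ∉ u') :
    l.countP (fun x => decide (x ∉ u')) =
      l.countP (fun x => decide (x ∉ (k :: u'))) + l.count k := by
  induction l with
  | nil => simp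
  | cons a l ihl =>
    rw [List.countP_cons, List.countP_cons, List.count_cons, ihl]
    by_cases hak : a = k
    · subst hak; simp [hk]; omega
    · simp [hak]
      by_cases hau : a ∈ u'
      · simp [hau]
      · simp [hau]
        omega

-- B's prefix-sum fold over a strictly increasing key list
theorem pyB_fold_spec (l : List Int) (u : List Int) (hp : u.Pairwise (· < ·))
    (hless : ∀ x ∈ l, x ∉ u → ∀ k ∈ u, x < k) :
    ∀ (t : Int) (res : List Int), t = (l.countP (fun x => decide (x ∉ u)) : Int) →
    (u.foldl (fun (acc : Int × List Int) r =>
        (acc.1 + (PySem.Dict.counter l).getD r 0,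
         acc.2 ++ [acc.1 + (PySem.Dict.counter l).getD r 0])) (t, res)).2
      = res ++ u.map (fun k => ((l.countP (fun x => decide (x ≤ k)) : Nat) : Int)) := by
  induction u with
  | nil => intro t res _; simp
  | cons k u' ihu =>
    intro t res ht
    have hku' : k ∉ u' := by
      intro hmem
      exact lt_irrefl k ((List.pairwise_cons.mp hp).1 k hmem)
    have hmem_iff : ∀ x ∈ l, (x ∉ u' ↔ x ≤ k) := by
      intro x hx
      constructor
      · intro hxu'
        by_cases hxk : x = k
        · omega
        · have hxu : x ∉ (k :: u') := by simp [hxk, hxu']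
          exact le_of_lt (hless x hx hxu k List.mem_cons_self)
      · intro hxk hmem
        have := (List.pairwise_cons.mp hp).1 x hmem
        omega
    have hstep : t + (PySem.Dict.counter l).getD k 0
        = (l.countP (fun x => decide (x ∉ u')) : Int) := by
      rw [PySem.Dict.getD_counter, ht, countP_notmem_cons l k u' hku']
      push_cast
      ring
    have hstep' : t + (PySem.Dict.counter l).getD k 0
        = (l.countP (fun x => decide (x ≤ k)) : Int) := by
      rw [hstep]
      congr 1
      apply List.countP_congr
      intro x hx
      simpa using hmem_iff x hx
    rw [List.foldl_cons]
    rw [ihu (List.pairwise_cons.mp hp).2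
      (by intro x hx hxu' k' hk'
          have hxk := (hmem_iff x hx).mp hxu'
          have := (List.pairwise_cons.mp hp).1 k' hk'
          omega)
      _ _ hstep]
    rw [List.map_cons, hstep']
    simp



-- ===== VERDICT (by name: the statement is the Claim_ definition above) =====
theorem recalculate_ranks_spec : Claim_equal_recalculate_ranks := by
  intro l _hdom
  unfold Spec_recalculate_ranks
  have hs : (PySem.List.sorted l (fun x => x) false).Pairwise (· ≤ ·) :=
    PySem.List.sorted_pairwise l (fun x => x)
  obtain ⟨u, hpu, hmu, heu⟩ := pyA_loop_spec (PySem.List.sorted l (fun x => x) false) hs 0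
    PySem.Dict.empty (Nat.zero_le _) (by simp) (by simp [PySem.Dict.keys_empty])
  have hmu' : ∀ x, x ∈ u ↔ x ∈ l := by
    intro x
    rw [hmu x, List.drop_zero, PySem.List.mem_sorted]
  have hpks : (PySem.List.sorted (PySem.Dict.counter l).keys (fun x => x) false).Pairwise (· < ·) := by
    rw [PySem.Dict.keys_counter]
    exact PySem.List.sorted_ofList_pairwise_lt l
  have hmks : ∀ x, x ∈ PySem.List.sorted (PySem.Dict.counter l).keys (fun x => x) false ↔ x ∈ l := by
    intro x
    rw [PySem.List.mem_sorted, PySem.Dict.keys_counter, PySem.Set.mem_ofList]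
  have hfold := pyB_fold_spec l (PySem.List.sorted (PySem.Dict.counter l).keys (fun x => x) false)
    hpks (fun x hx hnx _k hk => absurd ((hmks x).mpr hx) hnx) 0 []
    (by rw [List.countP_eq_zero.mpr]
        · simp
        · intro x hx
          simp
          exact hx)
  have hueq : u = PySem.List.sorted (PySem.Dict.counter l).keys (fun x => x) false := by
    have hnu : u.Nodup := hpu.imp (fun h => ne_of_lt h)
    have hnks : (PySem.List.sorted (PySem.Dict.counter l).keys (fun x => x) false).Nodup :=
      hpks.imp (fun h => ne_of_lt h)
    have hperm := (List.perm_ext_iff_of_nodup hnu hnks).mpr (fun a => by rw [hmu' a, hmks a])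
    exact hperm.eq_of_pairwise (fun a b _ _ h h' => absurd h' (lt_asymm h)) hpu hpks
  have hmapeq : u.map (fun k => (((PySem.List.sorted l (fun x => x) false).countP
        (fun x => decide (x ≤ k)) : Nat) : Int))
      = (PySem.List.sorted (PySem.Dict.counter l).keys (fun x => x) false).map
        (fun k => ((l.countP (fun x => decide (x ≤ k)) : Nat) : Int)) := by
    rw [hueq]
    apply List.map_congr_left
    intro k _hk
    rw [(PySem.List.sorted_perm l (fun x => x) false).countP_eq]
  show pvOut (pyA_loop (PySem.List.sorted l (fun x => x) false) 0 PySem.Dict.empty)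
      = recalculate_ranks_alt l
  rw [heu, hmapeq]
  unfold recalculate_ranks_alt
  simp only [PySem.Dict.foldl_insert_getD_add_one_eq_counter]
  rw [hfold]
  simp [pvOut, PySem.Dict.keys_empty]
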